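-- pv_equiv track=rewrite | github.com/manisudhan/crypto_route_cipher | code.py | decrypt_route_cipher
-- ===== SOURCE A (Python) =====
-- def decrypt_route_cipher(cipher, rows, cols):
--     matrix = [['' for _ in range(cols)] for _ in range(rows)]
--
--     # Fill column-wise
--     k = 0
--     for j in range(cols):
--         for i in range(rows):
--             matrix[i][j] = cipher[k]
--             k += 1
--
--     # Read row-wise
--     text = ""
--     for i in range(rows):
--         for j in range(cols):
--             text += matrix[i][j]
--
--     return text
-- ===== SOURCE B (Python) =====
-- def decrypt_route_cipher(cipher, rows, cols):
--     return ''.join(cipher[j * rows + i] for i in range(rows) for j in range(cols))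
-- ===== Notes on version B (the rewrite author's own statement) =====
-- stated objective: simpler
-- what changed: Drops the fill-then-read 2D matrix entirely: each output character is read directly from the cipher at the closed-form index j*rows+i in a single join.
import Mathlib
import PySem

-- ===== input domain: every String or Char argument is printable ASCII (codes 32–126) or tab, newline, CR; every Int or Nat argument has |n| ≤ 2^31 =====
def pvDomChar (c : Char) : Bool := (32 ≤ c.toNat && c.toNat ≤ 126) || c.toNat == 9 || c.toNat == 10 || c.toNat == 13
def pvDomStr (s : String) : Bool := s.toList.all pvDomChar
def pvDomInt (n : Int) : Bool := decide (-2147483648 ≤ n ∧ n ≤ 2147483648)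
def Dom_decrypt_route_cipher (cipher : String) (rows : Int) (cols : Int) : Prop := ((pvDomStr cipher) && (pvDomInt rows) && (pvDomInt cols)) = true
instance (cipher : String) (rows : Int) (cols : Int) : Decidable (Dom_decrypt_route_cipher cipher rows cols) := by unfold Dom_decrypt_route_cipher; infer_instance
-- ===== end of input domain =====

-- B drops A's fill-then-read 2D matrix and reads each output character directly at the
-- closed-form index j*rows+i in a single join (objective: simpler).

-- ===== PORT A =====
-- matrix[i][j] = c  (Python's nested list assignment); indices produced by range() are nonnegative
def pvSetCell (M : List (List Char)) (i : Int) (j : Int) (c : Char) : List (List Char) :=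
  PySem.List.pySetD M i (PySem.List.pySetD (PySem.List.pyGetD M i []) j c)

-- body of the inner fill loop: matrix[i][j] = cipher[k]; k += 1
def pvFillStep (cs : List Char) (j : Int) (st : List (List Char) × Int) (i : Int) :
    List (List Char) × Int :=
  (pvSetCell st.1 i j (PySem.List.pyGetD cs st.2 ' '), st.2 + 1)

-- Python initialises each cell to ''; every cell the read pass visits is overwritten by the fill
-- pass first (and Pre_ excludes the IndexError region), so the dummy ' ' cell is never observed.
def decrypt_route_cipher (cipher : String) (rows : Int) (cols : Int) : String :=
  let cs := cipher.toList
  let matrix : List (List Char) :=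
    (PySem.List.pyRange 0 rows 1).map (fun _ => (PySem.List.pyRange 0 cols 1).map (fun _ => ' '))
  let filled :=
    (PySem.List.pyRange 0 cols 1).foldl
      (fun st j => (PySem.List.pyRange 0 rows 1).foldl (pvFillStep cs j) st) (matrix, 0)
  let text :=
    (PySem.List.pyRange 0 rows 1).foldl (fun t i =>
      (PySem.List.pyRange 0 cols 1).foldl (fun t j =>
        t ++ [PySem.List.pyGetD (PySem.List.pyGetD filled.1 i []) j ' ']) t) ([] : List Char)
  String.ofList text

-- ===== PORT B =====
def decrypt_route_cipher_alt (cipher : String) (rows : Int) (cols : Int) : String :=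
  String.ofList ((PySem.List.pyRange 0 rows 1).flatMap (fun i =>
    (PySem.List.pyRange 0 cols 1).map (fun j =>
      PySem.List.pyGetD cipher.toList (j * rows + i) ' ')))

-- ===== PRECONDITION & SPEC =====
-- Pre_ excludes exactly the inputs where Python A raises IndexError: rows, cols > 0 with a cipher
-- shorter than rows*cols (B raises there too).
def Pre_decrypt_route_cipher (cipher : String) (rows : Int) (cols : Int) : Prop :=
  rows ≤ 0 ∨ cols ≤ 0 ∨ rows * cols ≤ PySem.Str.len cipher
instance (cipher : String) (rows : Int) (cols : Int) : Decidable (Pre_decrypt_route_cipher cipher rows cols) := by unfold Pre_decrypt_route_cipher; infer_instance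
def pvWitness_decrypt_route_cipher : String × Int × Int := ("abcdef", 2, 3)

def Spec_decrypt_route_cipher (cipher : String) (rows : Int) (cols : Int) (out : String) : Prop := out = decrypt_route_cipher_alt cipher rows cols
instance (cipher : String) (rows : Int) (cols : Int) (out : String) : Decidable (Spec_decrypt_route_cipher cipher rows cols out) := by unfold Spec_decrypt_route_cipher; infer_instance

-- ===== CLAIM (what is proved, stated in full; the proofs are below) =====
def Claim_equal_decrypt_route_cipher : Prop := ∀ (cipher : String) (rows : Int) (cols : Int), Dom_decrypt_route_cipher cipher rows cols → Pre_decrypt_route_cipher cipher rows cols → Spec_decrypt_route_cipher cipher rows cols (decrypt_route_cipher cipher rows cols)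

-- ===== LEMMAS AND PROOFS =====

-- matrix entry read the way A's read pass reads it
def pvGet2 (M : List (List Char)) (i j : Int) : Char :=
  PySem.List.pyGetD (PySem.List.pyGetD M i []) j ' '

-- rows × cols shape of the matrix
def pvShape (M : List (List Char)) (n m : Nat) : Prop :=
  M.length = n ∧ ∀ r ∈ M, r.length = m

lemma pvSetCell_spec (M : List (List Char)) (n m : Nat) (a j : Int) (c : Char)
    (hM : pvShape M n m) (ha0 : 0 ≤ a) (han : a < (n : Int)) (hj0 : 0 ≤ j) (hjm : j < (m : Int)) :
    pvShape (pvSetCell M a j c) n m ∧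
    ∀ i' jq : Int, 0 ≤ i' → 0 ≤ jq →
      pvGet2 (pvSetCell M a j c) i' jq =
        if i' = a ∧ jq = j then c else pvGet2 M i' jq := by
  obtain ⟨hlen, hrow⟩ := hM
  have haN : a.toNat < M.length := by omega
  have haM : a = ((a.toNat : Nat) : Int) := by omega
  have hrowmem : PySem.List.pyGetD M a [] = M[a.toNat] := by
    exact PySem.List.pyGetD_eq_getElem M [] ha0 (by omega)
  have hrlen : (M[a.toNat]).length = m := hrow _ (List.getElem_mem haN)
  constructor
  · constructor
    · simp [pvSetCell, PySem.List.length_pySetD, hlen]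
    · intro r hr
      unfold pvSetCell at hr
      rw [PySem.List.pySetD_of_nonneg _ _ ha0] at hr
      rcases List.mem_or_eq_of_mem_set hr with h | h
      · exact hrow r h
      · subst h
        rw [hrowmem, PySem.List.pySetD_of_nonneg _ _ hj0]
        simp [hrlen]
  · intro i' jq hi' hjq
    have hi'N : i' = ((i'.toNat : Nat) : Int) := by omega
    have hjqN : jq = ((jq.toNat : Nat) : Int) := by omega
    have hjN : j = ((j.toNat : Nat) : Int) := by omega
    unfold pvSetCell pvGet2
    rw [haM, hi'N, hjqN, hjN,
      PySem.List.pyGetD_pySetD_natCast M a.toNat i'.toNat _ [] haN]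
    have hrowmem' : PySem.List.pyGetD M ((a.toNat : Nat) : Int) [] = M[a.toNat] := by
      rw [← haM]; exact hrowmem
    by_cases hia : i'.toNat = a.toNat
    · rw [if_pos hia, hrowmem',
        PySem.List.pyGetD_pySetD_natCast M[a.toNat] j.toNat jq.toNat c ' ' (by omega)]
      by_cases hjj : jq.toNat = j.toNat
      · rw [if_pos hjj, if_pos ⟨by omega, by omega⟩]
      · rw [if_neg hjj, if_neg (by rintro ⟨h1, h2⟩; omega), hia, hrowmem']
    · rw [if_neg hia, if_neg (by rintro ⟨h1, h2⟩; omega)]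

lemma pvFill_inner (cs : List Char) (n m : Nat) (j : Int)
    (hj0 : 0 ≤ j) (hjm : j < (m : Int)) :
    ∀ (t : Nat) (a : Int) (M : List (List Char)) (k : Int), 0 ≤ a → a + t = (n : Int) →
    pvShape M n m → k = j * n + a →
    pvShape ((PySem.List.pyRange a n 1).foldl (pvFillStep cs j) (M, k)).1 n m ∧
    ((PySem.List.pyRange a n 1).foldl (pvFillStep cs j) (M, k)).2 = j * n + n ∧
    ∀ i' jq : Int, 0 ≤ i' → 0 ≤ jq →
      pvGet2 ((PySem.List.pyRange a n 1).foldl (pvFillStep cs j) (M, k)).1 i' jq =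
        if a ≤ i' ∧ i' < (n : Int) ∧ jq = j then PySem.List.pyGetD cs (j * n + i') ' '
        else pvGet2 M i' jq := by
  intro t
  induction t with
  | zero =>
    intro a M k ha0 hat hM hk
    rw [PySem.List.pyRange_one_eq_nil (by omega), List.foldl_nil]
    refine ⟨hM, by simp; omega, ?_⟩
    intro i' jq hi' hjq
    rw [if_neg (by rintro ⟨h1, h2, h3⟩; omega)]
  | succ t ih =>
    intro a M k ha0 hat hM hk
    rw [PySem.List.pyRange_one_cons (by omega), List.foldl_cons]
    have hcell := pvSetCell_spec M n m a j (PySem.List.pyGetD cs k ' ') hM ha0 (by omega) hj0 hjm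
    have hstep : pvFillStep cs j (M, k) a =
        (pvSetCell M a j (PySem.List.pyGetD cs k ' '), k + 1) := rfl
    rw [hstep]
    have hrec := ih (a + 1) (pvSetCell M a j (PySem.List.pyGetD cs k ' ')) (k + 1)
      (by omega) (by omega) hcell.1 (by omega)
    refine ⟨hrec.1, hrec.2.1, ?_⟩
    intro i' jq hi' hjq
    rw [hrec.2.2 i' jq hi' hjq, hcell.2 i' jq hi' hjq]
    by_cases h1 : a + 1 ≤ i' ∧ i' < (n : Int) ∧ jq = j
    · rw [if_pos h1, if_pos ⟨by omega, h1.2.1, h1.2.2⟩]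
    · rw [if_neg h1]
      by_cases h2 : i' = a ∧ jq = j
      · rw [if_pos h2, if_pos ⟨by omega, by omega, h2.2⟩, hk, h2.1]
      · rw [if_neg h2, if_neg (by rintro ⟨g1, g2, g3⟩; exact h2 ⟨by omega, g3⟩)]

lemma pvFill_outer (cs : List Char) (n m : Nat) :
    ∀ (t : Nat) (a : Int) (M : List (List Char)) (k : Int), 0 ≤ a → a + t = (m : Int) →
    pvShape M n m → k = a * n →
    pvShape ((PySem.List.pyRange a m 1).foldl
        (fun st j => (PySem.List.pyRange 0 n 1).foldl (pvFillStep cs j) st) (M, k)).1 n m ∧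
    ∀ i' jq : Int, 0 ≤ i' → 0 ≤ jq →
      pvGet2 ((PySem.List.pyRange a m 1).foldl
          (fun st j => (PySem.List.pyRange 0 n 1).foldl (pvFillStep cs j) st) (M, k)).1 i' jq =
        if i' < (n : Int) ∧ a ≤ jq ∧ jq < (m : Int) then PySem.List.pyGetD cs (jq * n + i') ' '
        else pvGet2 M i' jq := by
  intro t
  induction t with
  | zero =>
    intro a M k ha0 hat hM hk
    rw [PySem.List.pyRange_one_eq_nil (show (m:Int) ≤ a by omega), List.foldl_nil]
    refine ⟨hM, ?_⟩
    intro i' jq hi' hjq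
    rw [if_neg (by rintro ⟨h1, h2, h3⟩; omega)]
  | succ t ih =>
    intro a M k ha0 hat hM hk
    rw [PySem.List.pyRange_one_cons (show a < (m:Int) by omega), List.foldl_cons]
    have hcol := pvFill_inner cs n m a ha0 (by omega) n 0 M k (by omega) (by omega) hM (by omega)
    obtain ⟨st', hst'⟩ : ∃ st', (PySem.List.pyRange 0 n 1).foldl (pvFillStep cs a) (M, k) = st' :=
      ⟨_, rfl⟩
    rw [hst'] at hcol
    have hstpair : st' = (st'.1, st'.2) := rfl
    have hrec := ih (a + 1) st'.1 st'.2 (by omega) (by omega) hcol.1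
      (by rw [hcol.2.1]; ring)
    rw [hst', hstpair]
    refine ⟨hrec.1, ?_⟩
    intro i' jq hi' hjq
    rw [hrec.2 i' jq hi' hjq]
    by_cases h1 : i' < (n : Int) ∧ a + 1 ≤ jq ∧ jq < (m : Int)
    · rw [if_pos h1, if_pos ⟨h1.1, by omega, h1.2.2⟩]
    · rw [if_neg h1, hcol.2.2 i' jq hi' hjq]
      by_cases h2 : 0 ≤ i' ∧ i' < (n : Int) ∧ jq = a
      · rw [if_pos h2, if_pos ⟨h2.2.1, by omega, by omega⟩, h2.2.2]
      · rw [if_neg h2, if_neg (by rintro ⟨g1, g2, g3⟩; exact h2 ⟨hi', g1, by omega⟩)]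

-- A's fill places cipher[j*rows+i] at cell (i,j); the read pass then emits exactly B's join
lemma pvEquiv (cipher : String) (rows : Int) (cols : Int) :
    decrypt_route_cipher cipher rows cols = decrypt_route_cipher_alt cipher rows cols := by
  unfold decrypt_route_cipher decrypt_route_cipher_alt
  by_cases hr : 0 ≤ rows
  · by_cases hc : 0 ≤ cols
    · -- main case
      obtain ⟨n, rfl⟩ : ∃ n : Nat, rows = (n : Int) := ⟨rows.toNat, by omega⟩
      obtain ⟨m, rfl⟩ : ∃ m : Nat, cols = (m : Int) := ⟨cols.toNat, by omega⟩
      set cs := cipher.toList with hcs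
      have hshape : pvShape ((PySem.List.pyRange 0 (n : Int) 1).map
          (fun _ => (PySem.List.pyRange 0 (m : Int) 1).map (fun _ => ' '))) n m := by
        constructor
        · simp [PySem.List.length_pyRange_one]
        · intro r hr
          obtain ⟨x, hx, rfl⟩ := List.mem_map.mp hr
          simp [PySem.List.length_pyRange_one]
      have hfill := pvFill_outer cs n m m 0 _ 0 le_rfl (by omega) hshape (by ring)
      simp only [PySem.List.foldl_append_singleton_eq_map, PySem.List.foldl_append_eq_flatMap,
        List.nil_append]
      congr 1
      apply List.flatMap_congr
      intro i hi
      apply List.map_congr_left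
      intro j hj
      have hi' := PySem.List.mem_pyRange_one.mp hi
      have hj' := PySem.List.mem_pyRange_one.mp hj
      have := hfill.2 i j hi'.1 hj'.1
      rw [if_pos ⟨hi'.2, hj'.1, hj'.2⟩] at this
      exact this
    · -- cols < 0
      rw [PySem.List.pyRange_one_eq_nil (show cols ≤ 0 by omega)]
      simp [List.foldl_fixed]
  · -- rows < 0
    rw [PySem.List.pyRange_one_eq_nil (show rows ≤ 0 by omega)]
    simp

-- ===== VERDICT (by name: the statement is the Claim_ definition above) =====
theorem decrypt_route_cipher_spec : Claim_equal_decrypt_route_cipher := by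
  intro cipher rows cols _ _
  unfold Spec_decrypt_route_cipher
  exact pvEquiv cipher rows cols
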